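-- pv_equiv track=rewrite | github.com/romus831/mLLn | deplom/inject_mnnl_body.py | esc
-- ===== SOURCE A (Python) =====
-- def esc(s: str) -> str:
--     s = (
--         s.replace("&", "&amp;")
--         .replace("<", "&lt;")
--         .replace(">", "&gt;")
--         .replace("\r\n", "\n")
--         .replace("\r", "\n")
--     )
--     # XML 1.0 / Word: убрать недопустимые управляющие символы (кроме TAB/LF/CR)
--     return "".join(
--         ch
--         for ch in s
--         if ch in "\t\n\r" or ord(ch) >= 32 and not (0xD800 <= ord(ch) <= 0xDFFF)
--     )
-- ===== SOURCE B (Python) =====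
-- def esc(s: str) -> str:
--     out = []
--     i = 0
--     n = len(s)
--     while i < n:
--         ch = s[i]
--         if ch == '&':
--             out.append('&amp;')
--         elif ch == '<':
--             out.append('&lt;')
--         elif ch == '>':
--             out.append('&gt;')
--         elif ch == '\r':
--             out.append('\n')
--             if i + 1 < n and s[i + 1] == '\n':
--                 i += 1
--         elif ch == '\t' or ch == '\n' or (ord(ch) >= 32 and not (0xD800 <= ord(ch) <= 0xDFFF)):
--             out.append(ch)
--         i += 1
--     return ''.join(out)
-- ===== Notes on version B (the rewrite author's own statement) =====
-- stated objective: alternative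
-- what changed: Replaced A's five sequential .replace passes plus a filtering comprehension (seven traversals building intermediate strings) with one fused index loop over the input that emits escapes, collapses \r/\r\n via one-character lookahead, and filters, in a single pass.
import Mathlib
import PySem

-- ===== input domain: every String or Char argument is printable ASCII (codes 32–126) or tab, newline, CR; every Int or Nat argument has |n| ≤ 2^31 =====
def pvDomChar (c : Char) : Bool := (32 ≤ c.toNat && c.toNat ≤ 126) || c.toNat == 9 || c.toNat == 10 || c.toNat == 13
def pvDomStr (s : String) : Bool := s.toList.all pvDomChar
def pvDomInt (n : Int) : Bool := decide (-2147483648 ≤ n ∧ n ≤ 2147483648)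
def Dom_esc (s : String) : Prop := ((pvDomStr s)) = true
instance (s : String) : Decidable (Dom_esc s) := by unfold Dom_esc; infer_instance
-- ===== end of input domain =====

-- B fuses A's five .replace passes and the filtering comprehension into ONE indexed loop
-- with a one-character lookahead for the "\r\n" collapse (objective: alternative single-pass decomposition).

-- ===== PORT A =====
-- A's filter predicate: ch in "\t\n\r" or ord(ch) >= 32 and not (0xD800 <= ord(ch) <= 0xDFFF)
def escKeepA (ch : Char) : Bool :=
  PySem.Chars.isIn [ch] ['\t', '\n', '\r']
    || (decide (32 ≤ ch.toNat) && !(decide (0xD800 ≤ ch.toNat) && decide (ch.toNat ≤ 0xDFFF)))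

-- "".join(ch for ch in s5 if …) over single characters = the string of the kept characters (exact)
def esc (s : String) : String :=
  String.ofList
    ((PySem.Str.replace
        (PySem.Str.replace
          (PySem.Str.replace
            (PySem.Str.replace
              (PySem.Str.replace s "&" "&amp;")
              "<" "&lt;")
            ">" "&gt;")
          "\r\n" "\n")
        "\r" "\n").toList.filter escKeepA)

-- ===== PORT B =====
-- B's keep test for an ordinary character (the elif chain's last branch)
def escKeepB (ch : Char) : Bool :=
  ch = '\t' || ch = '\n'
    || (decide (32 ≤ ch.toNat) && !(decide (0xD800 ≤ ch.toNat) && decide (ch.toNat ≤ 0xDFFF)))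

-- Source B's while-loop over the characters; the '\r'::'\n':: pattern is the i+1 lookahead/skip
def escAltGo : List Char → List Char
  | [] => []
  | '&' :: t => '&' :: 'a' :: 'm' :: 'p' :: ';' :: escAltGo t
  | '<' :: t => '&' :: 'l' :: 't' :: ';' :: escAltGo t
  | '>' :: t => '&' :: 'g' :: 't' :: ';' :: escAltGo t
  | '\r' :: '\n' :: t => '\n' :: escAltGo t
  | '\r' :: t => '\n' :: escAltGo t
  | c :: t => if escKeepB c then c :: escAltGo t else escAltGo t

def esc_alt (s : String) : String := String.ofList (escAltGo s.toList)

-- ===== PRECONDITION & SPEC =====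
def Spec_esc (s : String) (out : String) : Prop := out = esc_alt s
instance (s : String) (out : String) : Decidable (Spec_esc s out) := by unfold Spec_esc; infer_instance

-- ===== CLAIM (what is proved, stated in full; the proofs are below) =====
def Claim_equal_esc : Prop := ∀ (s : String), Dom_esc s → Spec_esc s (esc s)

-- ===== LEMMAS AND PROOFS =====

-- single-character replace, as a flatMap
def escRep1 (a : Char) (new : List Char) (c : Char) : List Char := if c = a then new else [c]

-- the "\r\n" → "\n" replace, structurally
def escRn : List Char → List Char
  | [] => []
  | c :: t => if c = '\r' ∧ t.head? = some '\n' then '\n' :: escRn t.tail else c :: escRn t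
termination_by l => l.length
decreasing_by all_goals (simp [List.length_tail]; try omega)

-- the three escaping replaces fused pointwise
def escE (c : Char) : List Char :=
  if c = '&' then ['&', 'a', 'm', 'p', ';']
  else if c = '<' then ['&', 'l', 't', ';']
  else if c = '>' then ['&', 'g', 't', ';']
  else [c]

-- per-character tail of A's pipeline: '\r' → '\n', then the filter
def escG (c : Char) : List Char := ((escRep1 '\r' ['\n'] c).filter escKeepA)

theorem escGo_single (a : Char) (new : List Char) :
    ∀ fuel (l acc : List Char), l.length ≤ fuel →
      PySem.Chars.replace.go [a] new fuel l acc
        = acc.reverse ++ l.flatMap (escRep1 a new) := by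
  intro fuel
  induction fuel with
  | zero =>
    intro l acc h
    cases l with
    | nil => simp [PySem.Chars.replace.go]
    | cons c t => simp at h
  | succ n ih =>
    intro l acc h
    cases l with
    | nil => simp [PySem.Chars.replace.go]
    | cons c t =>
      rw [show PySem.Chars.replace.go [a] new (n + 1) (c :: t) acc
          = if [a].isPrefixOf (c :: t) then
              PySem.Chars.replace.go [a] new n (List.drop 1 (c :: t)) (new.reverse ++ acc)
            else PySem.Chars.replace.go [a] new n t (c :: acc) from rfl]
      by_cases hc : c = a
      · subst hc
        simp only [List.isPrefixOf, BEq.rfl, Bool.true_and, List.isPrefixOf_nil_left, if_pos,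
          List.drop_one, List.tail_cons]
        rw [ih t (new.reverse ++ acc) (by simpa using Nat.le_of_succ_le_succ h)]
        simp [escRep1, List.flatMap_cons]
      · have : [a].isPrefixOf (c :: t) = false := by
          simp [List.isPrefixOf, beq_iff_eq]
          exact fun hh => hc hh.symm
        rw [this]
        simp only [if_neg Bool.false_ne_true]
        rw [ih t (c :: acc) (by simpa using Nat.le_of_succ_le_succ h)]
        simp [escRep1, List.flatMap_cons, hc]

theorem escReplace_single (l : List Char) (a : Char) (new : List Char) :
    PySem.Chars.replace l [a] new = l.flatMap (escRep1 a new) := by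
  rw [show PySem.Chars.replace l [a] new
      = PySem.Chars.replace.go [a] new l.length l [] from rfl]
  simpa using escGo_single a new l.length l [] le_rfl

theorem escGo_rn :
    ∀ fuel (l acc : List Char), l.length ≤ fuel →
      PySem.Chars.replace.go ['\r', '\n'] ['\n'] fuel l acc = acc.reverse ++ escRn l := by
  intro fuel
  induction fuel with
  | zero =>
    intro l acc h
    cases l with
    | nil => simp [PySem.Chars.replace.go, escRn]
    | cons c t => simp at h
  | succ n ih =>
    intro l acc h
    cases l with
    | nil => simp [PySem.Chars.replace.go, escRn]
    | cons c t =>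
      rw [show PySem.Chars.replace.go ['\r', '\n'] ['\n'] (n + 1) (c :: t) acc
          = if ['\r', '\n'].isPrefixOf (c :: t) then
              PySem.Chars.replace.go ['\r', '\n'] ['\n'] n (List.drop 2 (c :: t)) (['\n'].reverse ++ acc)
            else PySem.Chars.replace.go ['\r', '\n'] ['\n'] n t (c :: acc) from rfl]
      by_cases hp : c = '\r' ∧ t.head? = some '\n'
      · obtain ⟨hc, ht⟩ := hp
        subst hc
        obtain ⟨t', rfl⟩ : ∃ t', t = '\n' :: t' := by
          cases t with
          | nil => simp at ht
          | cons d t' => simp at ht; exact ⟨t', by rw [ht]⟩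
        simp only [List.isPrefixOf, BEq.rfl, Bool.true_and, List.isPrefixOf_nil_left, if_pos,
          List.drop_succ_cons, List.drop_zero]
        rw [ih t' (['\n'].reverse ++ acc) (by simp at h ⊢; omega)]
        rw [show escRn ('\r' :: '\n' :: t') = '\n' :: escRn t' from by rw [escRn]; simp]
        simp
      · have hpre : ['\r', '\n'].isPrefixOf (c :: t) = false := by
          cases t with
          | nil => simp [List.isPrefixOf]
          | cons d t' =>
            simp only [List.isPrefixOf, List.isPrefixOf_nil_left, Bool.and_true,
              Bool.and_eq_false_iff, beq_eq_false_iff_ne, ne_eq]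
            by_cases hc : c = '\r'
            · right; intro hd; exact hp ⟨hc, by simp [← hd]⟩
            · left; intro hh; exact hc hh.symm
        rw [hpre]
        simp only [if_neg Bool.false_ne_true]
        rw [ih t (c :: acc) (by simp at h ⊢; omega)]
        rw [show escRn (c :: t) = c :: escRn t from by rw [escRn]; simp [hp]]
        simp

theorem escReplace_rn (l : List Char) :
    PySem.Chars.replace l ['\r', '\n'] ['\n'] = escRn l := by
  rw [show PySem.Chars.replace l ['\r', '\n'] ['\n']
      = PySem.Chars.replace.go ['\r', '\n'] ['\n'] l.length l [] from rfl]
  simpa using escGo_rn l.length l [] le_rfl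

theorem escE_spec (c : Char) :
    (escRep1 '&' ['&', 'a', 'm', 'p', ';'] c).flatMap
        (fun y => (escRep1 '<' ['&', 'l', 't', ';'] y).flatMap (escRep1 '>' ['&', 'g', 't', ';']))
      = escE c := by
  by_cases h1 : c = '&'
  · subst h1; decide
  · by_cases h2 : c = '<'
    · subst h2; decide
    · by_cases h3 : c = '>'
      · subst h3; decide
      · simp [escRep1, escE, h1, h2, h3]

theorem escRn_append_no_cr (xs ys : List Char) (h : ∀ c ∈ xs, c ≠ '\r') :
    escRn (xs ++ ys) = xs ++ escRn ys := by
  induction xs with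
  | nil => simp
  | cons c t ih =>
    have hc : c ≠ '\r' := h c (by simp)
    rw [List.cons_append, show escRn (c :: (t ++ ys)) = c :: escRn (t ++ ys) from by
      rw [escRn]; simp [hc]]
    rw [ih (fun d hd => h d (by simp [hd]))]
    simp

theorem escE_head_ne_lf (t : List Char) (h : t.head? ≠ some '\n') :
    (t.flatMap escE).head? ≠ some '\n' := by
  cases t with
  | nil => simp
  | cons d t' =>
    have hd : d ≠ '\n' := by intro hh; exact h (by simp [hh])
    by_cases h1 : d = '&'
    · subst h1; simp [escE, List.flatMap_cons]
    · by_cases h2 : d = '<'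
      · subst h2; simp [escE, List.flatMap_cons]
      · by_cases h3 : d = '>'
        · subst h3; simp [escE, List.flatMap_cons]
        · simp [escE, h1, h2, h3, List.flatMap_cons, hd]

theorem escKeep_agree (c : Char) (h : c ≠ '\r') : escKeepA c = escKeepB c := by
  by_cases hm : c ∈ (['\t', '\n', '\r'] : List Char)
  · have hIn : PySem.Chars.isIn [c] ['\t', '\n', '\r'] = true :=
      (PySem.Chars.isIn_iff_infix _ _).2 ((List.singleton_infix_iff c _).2 hm)
    simp at hm
    rcases hm with rfl | rfl | rfl
    · simp [escKeepA, escKeepB, hIn]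
    · simp [escKeepA, escKeepB, hIn]
    · exact absurd rfl h
  · have hIn : PySem.Chars.isIn [c] ['\t', '\n', '\r'] = false :=
      (PySem.Chars.isIn_eq_false_iff _ _).2 (fun hinf => hm ((List.singleton_infix_iff c _).1 hinf))
    simp at hm
    simp [escKeepA, escKeepB, hIn, hm.1, hm.2.1]

theorem escAltGo_default (c : Char) (t : List Char)
    (h1 : c ≠ '&') (h2 : c ≠ '<') (h3 : c ≠ '>') (h5 : c ≠ '\r') :
    escAltGo (c :: t) = if escKeepB c then c :: escAltGo t else escAltGo t := by
  rw [escAltGo.eq_def]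
  split <;> simp_all

theorem escAltGo_cr (t : List Char) (h : ∀ t1 : List Char, t = '\n' :: t1 → False) :
    escAltGo ('\r' :: t) = '\n' :: escAltGo t := by
  rw [escAltGo.eq_def]
  split
  case h_7 =>
    rename_i hne heq
    injection heq with hc ht
    exact absurd hc.symm hne
  all_goals simp_all

set_option maxRecDepth 4096 in
theorem escMain (l : List Char) :
    (escRn (l.flatMap escE)).flatMap escG = escAltGo l := by
  induction l using escAltGo.induct with
  | case1 =>
    rw [show (List.flatMap escE [] : List Char) = [] from rfl,
      show escRn ([] : List Char) = [] from by rw [escRn]]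
    rfl
  | case2 t ih =>
    rw [List.flatMap_cons, show escE '&' = ['&', 'a', 'm', 'p', ';'] from rfl,
      escRn_append_no_cr _ _ (by intro c hc; fin_cases hc <;> simp), List.flatMap_append, ih]
    rfl
  | case3 t ih =>
    rw [List.flatMap_cons, show escE '<' = ['&', 'l', 't', ';'] from rfl,
      escRn_append_no_cr _ _ (by intro c hc; fin_cases hc <;> simp), List.flatMap_append, ih]
    rfl
  | case4 t ih =>
    rw [List.flatMap_cons, show escE '>' = ['&', 'g', 't', ';'] from rfl,
      escRn_append_no_cr _ _ (by intro c hc; fin_cases hc <;> simp), List.flatMap_append, ih]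
    rfl
  | case5 t ih =>
    rw [List.flatMap_cons, List.flatMap_cons, show escE '\r' = ['\r'] from rfl,
      show escE '\n' = ['\n'] from rfl]
    rw [show (['\r'] : List Char) ++ (['\n'] ++ t.flatMap escE)
        = '\r' :: '\n' :: t.flatMap escE from rfl]
    rw [show escRn ('\r' :: '\n' :: t.flatMap escE) = '\n' :: escRn (t.flatMap escE) from by
      rw [escRn]; simp]
    rw [List.flatMap_cons, ih]
    rfl
  | case6 t h ih =>
    rw [List.flatMap_cons, show escE '\r' = ['\r'] from rfl]
    have hhd : (t.flatMap escE).head? ≠ some '\n' := by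
      apply escE_head_ne_lf
      intro hc
      cases t with
      | nil => simp at hc
      | cons d t' => simp at hc; exact h t' (by rw [hc])
    rw [show (['\r'] : List Char) ++ t.flatMap escE = '\r' :: t.flatMap escE from rfl]
    rw [show escRn ('\r' :: t.flatMap escE) = '\r' :: escRn (t.flatMap escE) from by
      rw [escRn]; simp [hhd]]
    rw [List.flatMap_cons, ih, show escG '\r' = ['\n'] from by decide,
      escAltGo_cr t h]
    rfl
  | case7 c t h1 h2 h3 h4 h5 h6 ih =>
    have hne : c ≠ '&' := fun hh => h1 hh
    have hne2 : c ≠ '<' := fun hh => h2 hh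
    have hne3 : c ≠ '>' := fun hh => h3 hh
    have hne5 : c ≠ '\r' := fun hh => h5 hh
    rw [List.flatMap_cons, show escE c = [c] from by simp [escE, hne, hne2, hne3],
      List.singleton_append]
    rw [show escRn (c :: t.flatMap escE) = c :: escRn (t.flatMap escE) from by
      rw [escRn]; simp [hne5]]
    rw [List.flatMap_cons, ih, escAltGo_default c t hne hne2 hne3 hne5]
    simp [escG, escRep1, hne5, escKeep_agree c hne5, h6]
  | case8 c t h1 h2 h3 h4 h5 h6 ih =>
    have hne : c ≠ '&' := fun hh => h1 hh
    have hne2 : c ≠ '<' := fun hh => h2 hh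
    have hne3 : c ≠ '>' := fun hh => h3 hh
    have hne5 : c ≠ '\r' := fun hh => h5 hh
    rw [List.flatMap_cons, show escE c = [c] from by simp [escE, hne, hne2, hne3],
      List.singleton_append]
    rw [show escRn (c :: t.flatMap escE) = c :: escRn (t.flatMap escE) from by
      rw [escRn]; simp [hne5]]
    rw [List.flatMap_cons, ih, escAltGo_default c t hne hne2 hne3 hne5]
    simp only [Bool.not_eq_true] at h6
    simp [escG, escRep1, hne5, escKeep_agree c hne5, h6]

-- ===== VERDICT (by name: the statement is the Claim_ definition above) =====
set_option maxRecDepth 4096 in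
theorem esc_spec : Claim_equal_esc := by
  intro s _
  unfold Spec_esc esc esc_alt
  refine congrArg String.ofList ?_
  simp only [PySem.Str.toList_replace]
  rw [show ("&" : String).toList = ['&'] from rfl, show ("&amp;" : String).toList = ['&','a','m','p',';'] from rfl,
    show ("<" : String).toList = ['<'] from rfl, show ("&lt;" : String).toList = ['&','l','t',';'] from rfl,
    show (">" : String).toList = ['>'] from rfl, show ("&gt;" : String).toList = ['&','g','t',';'] from rfl,
    show ("\r\n" : String).toList = ['\r','\n'] from rfl, show ("\n" : String).toList = ['\n'] from rfl,
    show ("\r" : String).toList = ['\r'] from rfl]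
  rw [escReplace_single, escReplace_single, escReplace_single, escReplace_rn, escReplace_single]
  rw [List.flatMap_assoc, List.flatMap_assoc]
  simp only [escE_spec]
  rw [List.filter_flatMap]
  exact escMain s.toList
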